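-- pv_equiv track=rewrite | github.com/V1CT0R-06/ECT_2ano | FP2/testing.py | commonInterests
-- ===== SOURCE A (Python) =====
-- def commonInterests(interests):
--     people = list(interests.keys())
--     result = {}
--     n = len(people)
--
--     for i in range(n):
--         for j in range(i + 1, n):
--             p1 = people[i]
--             p2 = people[j]
--             result[(p1, p2)] = interests[p1] & interests[p2]
--
--     return result
-- ===== SOURCE B (Python) =====
-- def commonInterests(interests):
--     items = list(interests.items())
--
--     # every i<j pair starts as an empty intersection, in key order
--     result = {}
--     rest = items
--     while rest:
--         (p, _), rest = rest[0], rest[1:]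
--         for q, _ in rest:
--             result[(p, q)] = set()
--
--     # inverted index: interest -> the people who have it, in key order
--     postings = {}
--     for p, s in items:
--         for x in s:
--             postings.setdefault(x, []).append(p)
--
--     # walk people in order; drop the current person from the index first,
--     # so each shared interest lands in the pair with every LATER owner
--     for p, s in items:
--         for x in s:
--             postings[x].remove(p)
--         for x in s:
--             for q in postings[x]:
--                 result[(p, q)].add(x)
--     return result
-- ===== Notes on version B (the rewrite author's own statement) =====
-- stated objective: alternative
-- what changed: A intersects every pair of interest sets with nested index loops over the key list; B builds an inverted index interest -> owners once and fills each pair's intersection from the postings of each interest, walking people in key order and dropping each person from the index before pairing so only later owners remain.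
import Mathlib
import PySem

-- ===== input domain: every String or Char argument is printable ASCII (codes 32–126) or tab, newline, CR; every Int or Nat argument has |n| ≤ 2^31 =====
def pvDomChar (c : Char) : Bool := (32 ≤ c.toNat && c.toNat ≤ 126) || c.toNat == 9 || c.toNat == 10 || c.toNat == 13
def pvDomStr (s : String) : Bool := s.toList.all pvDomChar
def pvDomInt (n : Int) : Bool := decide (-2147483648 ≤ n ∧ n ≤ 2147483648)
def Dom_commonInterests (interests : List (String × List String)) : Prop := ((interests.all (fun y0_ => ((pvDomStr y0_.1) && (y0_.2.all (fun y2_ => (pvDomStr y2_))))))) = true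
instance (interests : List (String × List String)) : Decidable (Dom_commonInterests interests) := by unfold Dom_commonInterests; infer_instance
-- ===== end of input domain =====

-- B replaces A's nested index loops (intersecting every two sets) by an inverted index
-- interest -> owners, filling each pair's intersection from the postings of each
-- interest; objective: alternative algorithm of the same cost.

-- ===== PORT A =====
-- literal transliteration of A: people = keys, nested index loops, result[(p1,p2)] = interests[p1] & interests[p2]
def commonInterests (interests : List (String × List String)) : List (String × String × List String) :=
  let d := PySem.Dict.ofList interests
  let people := d.keys
  let n : Int := (people.length : Int)
  let result : PySem.Dict (String × String) (List String) :=
    (PySem.List.pyRange 0 n).foldl (fun result i =>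
      (PySem.List.pyRange (i + 1) n).foldl (fun result j =>
        let p1 := PySem.List.pyGetD people i ""
        let p2 := PySem.List.pyGetD people j ""
        result.insert (p1, p2) (PySem.Set.inter (d.getD p1 []) (d.getD p2 []))) result)
      PySem.Dict.empty
  result.items.map (fun kv => (kv.1.1, kv.1.2, kv.2))

-- ===== PORT B =====
-- the `while rest:` loop of Source B: peel the first person, give them an empty pair with every later person
def pvInitPairs : List (String × List String) → PySem.Dict (String × String) (List String) → PySem.Dict (String × String) (List String)
  | [], result => result
  | pr :: rest, result => pvInitPairs rest (rest.foldl (fun r qt => r.insert (pr.1, qt.1) PySem.Set.empty) result)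

-- body of Source B's third loop; `postings[x].remove(p)` is modify + remove? (the lookup and the
-- removal always succeed in reachable states, where `.getD`/`.getD v` are exact)
def pvFillStep (st : PySem.Dict String (List String) × PySem.Dict (String × String) (List String))
    (pr : String × List String) :
    PySem.Dict String (List String) × PySem.Dict (String × String) (List String) :=
  let postings := pr.2.foldl (fun postings x =>
    postings.modify x [] (fun v => (PySem.List.remove? v pr.1).getD v)) st.1
  let result := pr.2.foldl (fun result x =>
    (postings.getD x []).foldl (fun result q =>
      result.modify (pr.1, q) [] (fun v => PySem.Set.add v x)) result) st.2
  (postings, result)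

def commonInterests_alt (interests : List (String × List String)) : List (String × String × List String) :=
  let items := (PySem.Dict.ofList interests).items
  let result := pvInitPairs items PySem.Dict.empty
  let postings : PySem.Dict String (List String) :=
    items.foldl (fun postings pr =>
      pr.2.foldl (fun postings x => postings.modify x [] (fun v => v ++ [pr.1])) postings)
      PySem.Dict.empty
  let st := items.foldl pvFillStep (postings, result)
  st.2.items.map (fun kv => (kv.1.1, kv.1.2, kv.2))

-- ===== PRECONDITION & SPEC =====
-- Pre_ excludes lists in which some person's interest list has duplicate elements: that list
-- stands for a Python set (distinct elements), so such an input encodes no input of A.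
def Pre_commonInterests (interests : List (String × List String)) : Prop :=
  ∀ pr ∈ interests, pr.2.Nodup
instance (interests : List (String × List String)) : Decidable (Pre_commonInterests interests) := by
  unfold Pre_commonInterests; infer_instance

def pvWitness_commonInterests : (List (String × List String)) :=
  [("ana", ["chess", "films"]), ("bob", ["films"]), ("eva", [])]

def Spec_commonInterests (interests : List (String × List String)) (out : List (String × String × List String)) : Prop := out = commonInterests_alt interests
instance (interests : List (String × List String)) (out : List (String × String × List String)) : Decidable (Spec_commonInterests interests out) := by unfold Spec_commonInterests; infer_instance

-- ===== CLAIM (what is proved, stated in full; the proofs are below) =====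
def Claim_equal_commonInterests : Prop := ∀ (interests : List (String × List String)), Dom_commonInterests interests → Pre_commonInterests interests → Spec_commonInterests interests (commonInterests interests)

-- ===== LEMMAS AND PROOFS =====

-- the common shape both programs reduce to: every (head, later) pair in key order
def pvGoPairs {σ α : Type} (g : σ → α → α → σ) : σ → List α → σ
  | acc, [] => acc
  | acc, x :: rest => pvGoPairs g (rest.foldl (fun a y => g a x y) acc) rest

def pvPairsSpec {ν : Type} (v : (String × List String) → (String × List String) → ν) :
    List (String × List String) → List ((String × String) × ν)
  | [] => []
  | pr :: rest => rest.map (fun qt => ((pr.1, qt.1), v pr qt)) ++ pvPairsSpec v rest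

def pvPairsKeys : List (String × List String) → List (String × String)
  | [] => []
  | pr :: rest => rest.map (fun qt => (pr.1, qt.1)) ++ pvPairsKeys rest

def pvDflt : String × List String := ("", [])

lemma pvGetD_mid {α : Type} (pre : List α) (x : α) (t : List α) (d : α) :
    (pre ++ x :: t).getD pre.length d = x := by
  simp [List.getD]

lemma pvGetD_map {α β : Type} (f : α → β) (l : List α) (j : Nat) (d : α) :
    (l.map f).getD j (f d) = f (l.getD j d) := by
  induction l generalizing j with
  | nil => simp [List.getD]
  | cons a t ih =>
    cases j with
    | zero => simp [List.getD]
    | succ j => simpa [List.getD] using ih j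

lemma pvRange_natCast (k a : Nat) :
    PySem.List.pyRange (a : Int) ((a + k : Nat) : Int) = (List.range' a k).map (fun n : Nat => (n : Int)) := by
  induction k generalizing a with
  | zero => simp [PySem.List.pyRange]
  | succ k ih =>
    rw [List.range'_succ, PySem.List.pyRange_one_cons (by push_cast; omega)]
    have e1 : ((a : Int) + 1) = (((a + 1 : Nat)) : Int) := by push_cast; ring
    have e2 : (((a + (k + 1) : Nat)) : Int) = (((a + 1) + k : Nat) : Int) := by push_cast; ring
    rw [e2, e1, ih (a + 1)]
    simp

lemma pvL1 {σ α : Type} (dflt : α) (h : σ → α → σ) :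
    ∀ (l pre : List α) (acc : σ),
      List.foldl (fun acc j => h acc ((pre ++ l).getD j dflt)) acc (List.range' pre.length l.length)
        = List.foldl h acc l := by
  intro l
  induction l with
  | nil => intro pre acc; simp
  | cons x t ih =>
    intro pre acc
    rw [List.length_cons, List.range'_succ, List.foldl_cons, pvGetD_mid]
    simpa [Nat.add_comm] using ih (pre ++ [x]) (h acc x)

lemma pvL2 {σ α : Type} (dflt : α) (g : σ → α → α → σ) :
    ∀ (l pre : List α) (acc : σ),
      List.foldl (fun acc i =>
          List.foldl (fun acc j => g acc ((pre ++ l).getD i dflt) ((pre ++ l).getD j dflt)) acc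
            (List.range' (i + 1) (pre.length + l.length - (i + 1))))
        acc (List.range' pre.length l.length)
        = pvGoPairs g acc l := by
  intro l
  induction l with
  | nil => intro pre acc; simp [pvGoPairs]
  | cons x t ih =>
    intro pre acc
    rw [List.length_cons, List.range'_succ, List.foldl_cons]
    have e1 : pre.length + (t.length + 1) - (pre.length + 1) = t.length := by omega
    rw [pvGetD_mid, e1]
    rw [show (List.foldl (fun acc j => g acc x ((pre ++ x :: t).getD j dflt)) acc
          (List.range' (pre.length + 1) t.length))
        = List.foldl (fun a y => g a x y) acc t from by
      simpa [Nat.add_comm] using pvL1 dflt (fun a y => g a x y) t (pre ++ [x]) acc]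
    have := ih (pre ++ [x]) (List.foldl (fun a y => g a x y) acc t)
    rw [show pre.length + (t.length + 1) = pre.length + 1 + t.length from by omega]
    rw [show pre ++ x :: t = (pre ++ [x]) ++ t from by simp]
    simp only [List.length_append, List.length_cons, List.length_nil] at this ⊢
    rw [this]
    rfl

lemma pvL3 {ν : Type} (v : (String × List String) → (String × List String) → ν) :
    ∀ (l : List (String × List String)) (acc : PySem.Dict (String × String) ν),
      (l.map Prod.fst).Nodup →
      (∀ k ∈ acc.keys, k.1 ∉ l.map Prod.fst) →
      (pvGoPairs (fun acc pr qt => acc.insert (pr.1, qt.1) (v pr qt)) acc l).items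
        = acc.items ++ pvPairsSpec v l := by
  intro l
  induction l with
  | nil =>
    intro acc h1 h2
    simp [pvGoPairs, pvPairsSpec]
  | cons pr rest ih =>
    intro acc h1 h2
    simp only [List.map_cons, List.nodup_cons] at h1
    have hfresh : ∀ qt ∈ rest, acc.contains ((fun qt : String × List String => (pr.1, qt.1)) qt) = false := by
      intro qt hqt
      rcases Bool.eq_false_or_eq_true (acc.contains (pr.1, qt.1)) with ht | hf
      · exact absurd (by simp : (pr.1, qt.1).1 ∈ (pr :: rest).map Prod.fst)
          (h2 _ ((PySem.Dict.contains_iff_mem_keys acc _).1 ht))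
      · simpa using hf
    have hknodup : (rest.map (fun qt : String × List String => (pr.1, qt.1))).Nodup := by
      have e : rest.map (fun qt : String × List String => (pr.1, qt.1))
          = (rest.map Prod.fst).map (fun q => (pr.1, q)) := by simp [Function.comp]
      rw [e]
      exact h1.2.map (fun a b hab => by simpa using hab)
    have hitems := PySem.Dict.items_foldl_insert_fresh rest
      (fun qt : String × List String => (pr.1, qt.1)) (fun qt => v pr qt) acc hfresh hknodup
    have hkeys := PySem.Dict.keys_foldl_insert_key rest
      (fun qt : String × List String => (pr.1, qt.1)) (fun _ qt => v pr qt) acc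
    show (pvGoPairs _ (rest.foldl (fun a qt => a.insert (pr.1, qt.1) (v pr qt)) acc) rest).items = _
    rw [ih _ h1.2 ?fresh]
    case fresh =>
      intro k hk
      rw [hkeys] at hk
      rcases (PySem.Set.mem_update _ _ _).1 hk with hk | hk
      · exact fun hmem => h2 k hk (by simp [hmem])
      · rcases List.mem_map.1 hk with ⟨qt, _, rfl⟩
        simpa using h1.1
    rw [hitems]
    simp [pvPairsSpec]

lemma pvPairsSpec_map_fst {ν : Type} (v : (String × List String) → (String × List String) → ν)
    (l : List (String × List String)) :
    (pvPairsSpec v l).map (·.1) = pvPairsKeys l := by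
  induction l with
  | nil => rfl
  | cons pr rest ih => simp [pvPairsSpec, pvPairsKeys, ih, Function.comp]

lemma pvPairsSpec_zero (l : List (String × List String)) :
    pvPairsSpec (fun _ _ => ([] : List String)) l = (pvPairsKeys l).map (fun k => (k, [])) := by
  induction l with
  | nil => rfl
  | cons pr rest ih => simp [pvPairsSpec, pvPairsKeys, ih, Function.comp]

lemma pvMem_pairsKeys (l : List (String × List String)) (k : String × String) :
    k ∈ pvPairsKeys l → k.1 ∈ l.map Prod.fst := by
  induction l with
  | nil => simp [pvPairsKeys]
  | cons pr rest ih =>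
    intro hk
    simp only [pvPairsKeys, List.mem_append, List.mem_map] at hk
    rcases hk with ⟨qt, _, rfl⟩ | hk
    · simp
    · simp [ih hk]

lemma pvPairsKeys_nodup (l : List (String × List String)) (h : (l.map Prod.fst).Nodup) :
    (pvPairsKeys l).Nodup := by
  induction l with
  | nil => simp [pvPairsKeys]
  | cons pr rest ih =>
    simp only [List.map_cons, List.nodup_cons] at h
    refine List.Nodup.append ?_ (ih h.2) ?_
    · have : rest.map (fun qt => (pr.1, qt.1)) = (rest.map Prod.fst).map (fun q => (pr.1, q)) := by
        simp [Function.comp]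
      rw [this]
      exact h.2.map (fun a b hab => by simpa using hab)
    · intro a ha hb
      rcases List.mem_map.1 ha with ⟨qt, hqt, rfl⟩
      have := pvMem_pairsKeys rest _ hb
      simp only at this
      exact h.1 this

lemma pvGetD_foldl_modify {κ ν β : Type} [BEq κ] [LawfulBEq κ] [DecidableEq κ]
    (key : β → κ) (f : β → ν → ν) (d0 : ν) :
    ∀ (l : List β) (d : PySem.Dict κ ν) (k : κ),
      (l.foldl (fun d b => d.modify (key b) d0 (f b)) d).getD k d0
        = (l.filter (fun b => key b == k)).foldl (fun v b => f b v) (d.getD k d0) := by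
  intro l
  induction l with
  | nil => intro d k; simp
  | cons b t ih =>
    intro d k
    rw [List.foldl_cons, ih]
    by_cases hbk : key b = k
    · subst hbk
      simp [PySem.Dict.getD_modify, List.filter_cons]
    · have h1 : (key b == k) = false := by simp [hbk]
      rw [List.filter_cons]
      simp only [h1, Bool.false_eq_true, if_false]
      rw [PySem.Dict.getD_modify, if_neg (show ¬ k = key b from fun h => hbk h.symm)]

lemma pvSet_update_eq_self {α : Type} [BEq α] [LawfulBEq α] :
    ∀ (xs : List α) (s : PySem.Set α), (∀ x ∈ xs, x ∈ s) → PySem.Set.update s xs = s := by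
  intro xs
  induction xs with
  | nil => intro s h; rfl
  | cons x t ih =>
    intro s h
    have hadd : PySem.Set.add s x = s := by
      have hm : x ∈ s := h x (by simp)
      have hc := (PySem.Set.contains_iff s x).2 hm
      simp [PySem.Set.add, hc, hm]
    calc PySem.Set.update s (x :: t) = PySem.Set.update (PySem.Set.add s x) t := rfl
      _ = s := by rw [hadd]; exact ih s (fun y hy => h y (by simp [hy]))

lemma pvCount_filter_map_fst (c : (String × List String) → Bool) :
    ∀ (l : List (String × List String)) (qt : String × List String),
      (l.map Prod.fst).Nodup → qt ∈ l →
      ((l.filter c).map (·.1)).count qt.1 = if c qt then 1 else 0 := by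
  intro l
  induction l with
  | nil => intro qt h hm; simp at hm
  | cons pr t ih =>
    intro qt h hm
    simp only [List.map_cons, List.nodup_cons] at h
    have hsub : ∀ a, a ∈ (List.filter c t).map (·.1) → a ∈ t.map Prod.fst := by
      intro a ha
      rcases List.mem_map.1 ha with ⟨u, hu, rfl⟩
      exact List.mem_map_of_mem (List.mem_of_mem_filter hu)
    rcases List.mem_cons.1 hm with rfl | hmt
    · have hz : ((List.filter c t).map (·.1)).count qt.1 = 0 :=
        List.count_eq_zero.2 (fun hc => h.1 (hsub _ hc))
      by_cases hc : c qt
      · simp [List.filter_cons, hc, List.count_cons, hz]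
      · simp [List.filter_cons, hc, hz]
    · have hne : pr.1 ≠ qt.1 := by
        intro e
        exact h.1 (e ▸ List.mem_map_of_mem hmt)
      by_cases hc : c pr
      · simp [List.filter_cons, hc, List.count_cons, hne, ih qt h.2 hmt]
      · simp [List.filter_cons, hc, ih qt h.2 hmt]

lemma pvFlatFilter (x : String) :
    ∀ (l : List (String × List String)), (∀ pr ∈ l, pr.2.Nodup) →
      ((l.flatMap (fun pr => pr.2.map (fun y => (y, pr.1)))).filter (fun p => p.1 == x)).map (·.2)
        = (l.filter (fun pr => pr.2.contains x)).map (·.1) := by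
  intro l
  induction l with
  | nil => intro _; simp
  | cons pr t ih =>
    intro hnd
    have hh := hnd pr (by simp)
    simp only [List.flatMap_cons, List.filter_append, List.map_append, List.filter_cons]
    rw [ih (fun q hq => hnd q (by simp [hq])), List.filter_map]
    have e : pr.2.filter ((fun p : String × String => p.1 == x) ∘ (fun y => (y, pr.1)))
        = pr.2.filter (· == x) := rfl
    rw [e, List.filter_beq]
    by_cases hx : x ∈ pr.2
    · have h1 : pr.2.count x = 1 := List.count_eq_one_of_mem hh hx
      have hc : pr.2.contains x = true := List.elem_eq_true_of_mem hx
      simp [h1, hc, hx]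
    · have h0 : pr.2.count x = 0 := List.count_eq_zero.2 hx
      have hc : pr.2.contains x = false := by
        rcases Bool.eq_false_or_eq_true (pr.2.contains x) with h | h
        · exact absurd (List.mem_of_elem_eq_true h) hx
        · exact h
      simp [h0, hc, hx]

lemma pvPostings_getD (l : List (String × List String)) (hnd : ∀ pr ∈ l, pr.2.Nodup) (x : String) :
    (l.foldl (fun postings pr =>
        pr.2.foldl (fun postings x => postings.modify x [] (fun v => v ++ [pr.1])) postings)
      PySem.Dict.empty).getD x []
      = (l.filter (fun pr => pr.2.contains x)).map (·.1) := by
  have hflat :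
      l.foldl (fun postings pr =>
        pr.2.foldl (fun postings x => postings.modify x [] (fun v => v ++ [pr.1])) postings)
        PySem.Dict.empty
      = (l.flatMap (fun pr => pr.2.map (fun y => (y, pr.1)))).foldl
          (fun d p => d.modify p.1 [] (fun v => v ++ [p.2])) PySem.Dict.empty := by
    rw [List.foldl_flatMap]
    refine PySem.List.foldl_congr_mem _ _ _ _ (fun acc pr _ => ?_)
    rw [List.foldl_map]
  rw [hflat, PySem.Dict.getD_foldl_modify_append]
  simp only [PySem.Dict.getD_empty, List.nil_append]
  exact pvFlatFilter x l hnd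

lemma pvValues_nodup (interests : List (String × List String))
    (h : ∀ pr ∈ interests, pr.2.Nodup) :
    ∀ pr ∈ (PySem.Dict.ofList interests).items, pr.2.Nodup := by
  have aux : ∀ (ps : List (String × List String)) (d : PySem.Dict String (List String)),
      (∀ kv ∈ d.items, kv.2.Nodup) → (∀ p ∈ ps, p.2.Nodup) →
      ∀ kv ∈ (ps.foldl (fun d p => d.insert p.1 p.2) d).items, kv.2.Nodup := by
    intro ps
    induction ps with
    | nil => intro d hd _ kv hkv; exact hd kv hkv
    | cons p t ih =>
      intro d hd hp kv hkv
      refine ih (d.insert p.1 p.2) ?_ (fun q hq => hp q (by simp [hq])) kv hkv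
      intro kv' hkv'
      rcases (PySem.Dict.mem_items_insert _ _ _ _).1 hkv' with rfl | ⟨hmem, _⟩
      · exact hp p (by simp)
      · exact hd _ hmem
  exact aux interests PySem.Dict.empty
    (by intro kv hkv; simp [show (PySem.Dict.empty : PySem.Dict String (List String)).items = [] from rfl] at hkv) h

lemma pvInitPairs_eq (l : List (String × List String)) (acc : PySem.Dict (String × String) (List String)) :
    pvInitPairs l acc
      = pvGoPairs (fun acc pr qt => acc.insert (pr.1, qt.1) PySem.Set.empty) acc l := by
  induction l generalizing acc with
  | nil => rfl
  | cons pr rest ih => simp [pvInitPairs, pvGoPairs, ih]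

lemma pvRemove_cons {α : Type} [BEq α] [LawfulBEq α] (a : α) (t : List α) :
    PySem.List.remove? (a :: t) a = some t := by
  simp [PySem.List.remove?]
  exact ⟨0, by simp [List.idxOf?_cons], rfl⟩

lemma pvFlatMap_ite {α β : Type} (c : α → Bool) (g : α → β) (l : List α) :
    l.flatMap (fun x => if c x then [g x] else []) = (l.filter c).map g := by
  induction l with
  | nil => rfl
  | cons a t ih =>
    by_cases hc : c a
    · simp [List.filter_cons, hc, ih]
    · simp [List.filter_cons, hc, ih]

lemma pvFill :
    ∀ (l : List (String × List String)) (postings : PySem.Dict String (List String))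
      (result : PySem.Dict (String × String) (List String)),
      (l.map Prod.fst).Nodup →
      (∀ pr ∈ l, pr.2.Nodup) →
      (∀ x, postings.getD x [] = (l.filter (fun pr => pr.2.contains x)).map (·.1)) →
      (∀ k ∈ pvPairsKeys l, k ∈ result.keys) →
      (∀ k ∈ pvPairsKeys l, result.getD k [] = []) →
      ((l.foldl pvFillStep (postings, result)).2.keys = result.keys ∧
       (∀ k : String × String, k.1 ∉ l.map Prod.fst →
          (l.foldl pvFillStep (postings, result)).2.getD k [] = result.getD k []) ∧
       (∀ kv ∈ pvPairsSpec (fun pr qt => pr.2.filter (fun x => qt.2.contains x)) l,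
          (l.foldl pvFillStep (postings, result)).2.getD kv.1 [] = kv.2)) := by
  intro l
  induction l with
  | nil =>
    intro postings result _ _ _ _ _
    refine ⟨rfl, fun k _ => rfl, fun kv hkv => by simp [pvPairsSpec] at hkv⟩
  | cons pr rest ih =>
    intro postings result h1 h2 h3 h4 h5
    simp only [List.map_cons, List.nodup_cons] at h1
    have hh : pr.2.Nodup := h2 pr (by simp)
    -- the two dicts after this person's step
    set postings' := pr.2.foldl (fun p x =>
      p.modify x [] (fun v => (PySem.List.remove? v pr.1).getD v)) postings with hpo
    set result' := pr.2.foldl (fun r x =>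
      (postings'.getD x []).foldl (fun r q =>
        r.modify (pr.1, q) [] (fun v => PySem.Set.add v x)) r) result with hre
    have hstep : (pr :: rest).foldl pvFillStep (postings, result)
        = rest.foldl pvFillStep (postings', result') := rfl
    -- Step A: the index invariant advances from pr :: rest to rest
    have hA : ∀ x, postings'.getD x [] = (rest.filter (fun q => q.2.contains x)).map (·.1) := by
      intro x
      rw [hpo, pvGetD_foldl_modify (fun y : String => y)
        (fun _ v => (PySem.List.remove? v pr.1).getD v) [] pr.2 postings x, List.filter_beq,
        h3 x]
      by_cases hx : x ∈ pr.2
      · have h1c : pr.2.count x = 1 := List.count_eq_one_of_mem hh hx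
        have hcx : pr.2.contains x = true := List.elem_eq_true_of_mem hx
        simp only [h1c, List.replicate_one, List.foldl_cons, List.foldl_nil, List.filter_cons,
          hcx, if_true]
        simp [pvRemove_cons]
      · have h0 : pr.2.count x = 0 := List.count_eq_zero.2 hx
        have hcx : pr.2.contains x = false := by
          rcases Bool.eq_false_or_eq_true (pr.2.contains x) with h | h
          · exact absurd (List.mem_of_elem_eq_true h) hx
          · exact h
        simp [h0, List.filter_cons, hcx, hx]
    -- flatten this person's fill loop
    have hflat : result' = (pr.2.flatMap (fun x =>
        (postings'.getD x []).map (fun q => (x, q)))).foldl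
          (fun r t => r.modify (pr.1, t.2) [] (fun v => PySem.Set.add v t.1)) result := by
      rw [hre, List.foldl_flatMap]
      refine (PySem.List.foldl_congr_mem _ _ _ _ (fun acc x _ => ?_)).symm
      rw [List.foldl_map]
    -- every key this loop touches is a pair key of the head block
    have hTTmem : ∀ t ∈ pr.2.flatMap (fun x => (postings'.getD x []).map (fun q => (x, q))),
        (pr.1, t.2) ∈ pvPairsKeys (pr :: rest) := by
      intro t ht
      rcases List.mem_flatMap.1 ht with ⟨x, hx, hmapt⟩
      rcases List.mem_map.1 hmapt with ⟨q, hq, rfl⟩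
      rw [hA x] at hq
      rcases List.mem_map.1 hq with ⟨qt, hqt, rfl⟩
      exact List.mem_append_left _ (List.mem_map_of_mem (List.mem_of_mem_filter hqt))
    -- Step B1: this person's loop does not change the key set
    have hB1 : result'.keys = result.keys := by
      rw [hflat, PySem.Dict.keys_foldl_modify_key _ (fun t : String × String => (pr.1, t.2))
        [] (fun _ t v => PySem.Set.add v t.1) result]
      refine pvSet_update_eq_self _ _ (fun k hk => ?_)
      rcases List.mem_map.1 hk with ⟨t, ht, rfl⟩
      exact h4 _ (hTTmem t ht)
    -- Step B2 (i): keys with another first component keep their value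
    have hBi : ∀ k : String × String, k.1 ≠ pr.1 → result'.getD k [] = result.getD k [] := by
      intro k hk1
      rw [hflat, pvGetD_foldl_modify (fun t : String × String => (pr.1, t.2))
        (fun t v => PySem.Set.add v t.1) []]
      rw [List.filter_eq_nil_iff.2 (fun t _ => by
        simp only [beq_iff_eq]
        exact fun e => hk1 (by rw [← e]))]
      rfl
    -- Step B2 (ii): the head pair (pr.1, qt.1) now holds pr's interests shared with qt
    have hBii : ∀ qt ∈ rest, result'.getD (pr.1, qt.1) []
        = pr.2.filter (fun x => qt.2.contains x) := by
      intro qt hqt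
      rw [hflat, pvGetD_foldl_modify (fun t : String × String => (pr.1, t.2))
        (fun t v => PySem.Set.add v t.1) []]
      have hfe : (pr.2.flatMap (fun x => (postings'.getD x []).map (fun q => (x, q)))).filter
            (fun t => (pr.1, t.2) == (pr.1, qt.1))
          = (pr.2.filter (fun x => qt.2.contains x)).map (fun x => (x, qt.1)) := by
        rw [List.filter_flatMap]
        have hpoint : ∀ x ∈ pr.2, ((postings'.getD x []).map (fun q => (x, q))).filter
              (fun t => (pr.1, t.2) == (pr.1, qt.1))
            = if qt.2.contains x then [(x, qt.1)] else [] := by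
          intro x _
          rw [List.filter_map]
          have e1 : ((fun t : String × String => (pr.1, t.2) == (pr.1, qt.1)) ∘ (fun q => (x, q)))
              = (fun q => q == qt.1) := by
            funext q; simp
          rw [e1, hA x, List.filter_beq, pvCount_filter_map_fst _ rest qt h1.2 hqt]
          by_cases hc : x ∈ qt.2
          · simp [hc, List.elem_eq_true_of_mem hc]
          · have hcf : qt.2.contains x = false := by
              rcases Bool.eq_false_or_eq_true (qt.2.contains x) with h | h
              · exact absurd (List.mem_of_elem_eq_true h) hc
              · exact h
            simp [hc, hcf]
        calc pr.2.flatMap (fun x => ((postings'.getD x []).map (fun q => (x, q))).filter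
              (fun t => (pr.1, t.2) == (pr.1, qt.1)))
            = pr.2.flatMap (fun x => if qt.2.contains x then [(x, qt.1)] else []) := by
              refine List.flatMap_congr (fun x hx => hpoint x hx)
          _ = (pr.2.filter (fun x => qt.2.contains x)).map (fun x => (x, qt.1)) :=
              pvFlatMap_ite _ _ _
      rw [hfe, List.foldl_map]
      have hv0 : result.getD (pr.1, qt.1) [] = [] :=
        h5 _ (List.mem_append_left _ (List.mem_map_of_mem hqt))
      rw [hv0]
      rw [← PySem.Set.ofList_eq_foldl]
      exact PySem.Set.ofList_eq_self_of_nodup _ (hh.filter _)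
    -- Step C: induction on the remaining people
    have hC := ih postings' result' h1.2 (fun q hq => h2 q (by simp [hq])) hA
      (fun k hk => by rw [hB1]; exact h4 k (List.mem_append_right _ hk))
      (fun k hk => by
        rw [hBi k (fun e => h1.1 (e ▸ pvMem_pairsKeys rest k hk))]
        exact h5 k (List.mem_append_right _ hk))
    rw [hstep]
    refine ⟨by rw [hC.1, hB1], fun k hk => ?_, fun kv hkv => ?_⟩
    · simp only [List.map_cons, List.mem_cons, not_or] at hk
      rw [hC.2.1 k (fun h => hk.2 h), hBi k (fun e => hk.1 e)]
    · rcases List.mem_append.1 hkv with hkv | hkv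
      · rcases List.mem_map.1 hkv with ⟨qt, hqt, rfl⟩
        rw [hC.2.1 (pr.1, qt.1) (fun h => h1.1 h)]
        exact hBii qt hqt
      · exact hC.2.2 kv hkv

lemma pvA_eq (interests : List (String × List String)) :
    commonInterests interests
      = (pvPairsSpec (fun pr qt => pr.2.filter (fun x => qt.2.contains x))
          (PySem.Dict.ofList interests).items).map (fun kv => (kv.1.1, kv.1.2, kv.2)) := by
  set d := PySem.Dict.ofList interests with hd
  set l := d.items with hl
  have hndk : d.keys.Nodup := PySem.Dict.nodup_keys_ofList interests
  have hnd : (l.map Prod.fst).Nodup := hndk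
  have hkl : d.keys = l.map Prod.fst := rfl
  have hlen : d.keys.length = l.length := by rw [hkl, List.length_map]
  have hrange0 : PySem.List.pyRange 0 ((l.length : Nat) : Int)
      = (List.range' 0 l.length).map (fun n : Nat => (n : Int)) := by
    have h0 := pvRange_natCast l.length 0
    simpa only [Nat.cast_zero, Nat.zero_add] using h0
  have hfold :
      (PySem.List.pyRange 0 ((d.keys.length : Nat) : Int)).foldl (fun result i =>
        (PySem.List.pyRange (i + 1) ((d.keys.length : Nat) : Int)).foldl (fun result j =>
          result.insert (PySem.List.pyGetD d.keys i "", PySem.List.pyGetD d.keys j "")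
            (PySem.Set.inter (d.getD (PySem.List.pyGetD d.keys i "") [])
              (d.getD (PySem.List.pyGetD d.keys j "") []))) result)
        PySem.Dict.empty
      = pvGoPairs (fun acc pr qt => acc.insert (pr.1, qt.1) (PySem.Set.inter pr.2 qt.2))
          PySem.Dict.empty l := by
    rw [hlen, hrange0, List.foldl_map]
    have hmain := pvL2 pvDflt
      (fun acc pr qt => acc.insert (pr.1, qt.1) (PySem.Set.inter pr.2 qt.2)) l [] PySem.Dict.empty
    simp only [List.length_nil, List.nil_append, Nat.zero_add] at hmain
    rw [← hmain]
    refine PySem.List.foldl_congr_mem _ _ _ _ (fun acc i hi => ?_)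
    have hi' : i < l.length := by
      rcases List.mem_range'_1.1 hi with ⟨_, h2⟩
      omega
    have hcast : ((i : Int) + 1) = (((i + 1 : Nat)) : Int) := by push_cast; ring
    have hr : PySem.List.pyRange (((i + 1 : Nat)) : Int) ((l.length : Nat) : Int)
        = (List.range' (i + 1) (l.length - (i + 1))).map (fun n : Nat => (n : Int)) := by
      have h2 := pvRange_natCast (l.length - (i + 1)) (i + 1)
      rw [show (i + 1) + (l.length - (i + 1)) = l.length from by omega] at h2
      exact h2
    rw [hcast, hr, List.foldl_map]
    refine PySem.List.foldl_congr_mem _ _ _ _ (fun acc2 j hj => ?_)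
    have hj' : j < l.length := by
      rcases List.mem_range'_1.1 hj with ⟨_, h2⟩
      omega
    have hget : ∀ (m : Nat), m < l.length →
        PySem.List.pyGetD d.keys (m : Int) "" = (l.getD m pvDflt).1 := by
      intro m hm
      rw [PySem.List.pyGetD_natCast, hkl,
        show ("" : String) = pvDflt.1 from rfl, pvGetD_map]
    have hlook : ∀ (m : Nat), m < l.length →
        d.getD (l.getD m pvDflt).1 [] = (l.getD m pvDflt).2 := by
      intro m hm
      have hmem : ((l.getD m pvDflt).1, (l.getD m pvDflt).2) ∈ d.items := by
        rw [← hl, List.getD_eq_getElem l pvDflt hm]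
        simpa using List.getElem_mem hm
      exact PySem.Dict.getD_of_mem_items d hmem hndk []
    rw [hget i hi', hget j hj', hlook i hi', hlook j hj']
  simp only [commonInterests]
  rw [hfold]
  rw [pvL3 (fun pr qt => PySem.Set.inter pr.2 qt.2) l PySem.Dict.empty hnd
    (by intro k hk; simp [PySem.Dict.keys_empty] at hk)]
  rfl

lemma pvB_eq (interests : List (String × List String)) (h : Pre_commonInterests interests) :
    commonInterests_alt interests
      = (pvPairsSpec (fun pr qt => pr.2.filter (fun x => qt.2.contains x))
          (PySem.Dict.ofList interests).items).map (fun kv => (kv.1.1, kv.1.2, kv.2)) := by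
  set d := PySem.Dict.ofList interests with hd
  set l := d.items with hl
  have hndk : d.keys.Nodup := PySem.Dict.nodup_keys_ofList interests
  have hnd : (l.map Prod.fst).Nodup := hndk
  have hvals : ∀ pr ∈ l, pr.2.Nodup := pvValues_nodup interests h
  have hkeysdef : ∀ (dd : PySem.Dict (String × String) (List String)),
      dd.keys = dd.items.map (·.1) := fun _ => rfl
  have hinit : (pvInitPairs l PySem.Dict.empty).items
      = pvPairsSpec (fun _ _ => ([] : List String)) l := by
    rw [pvInitPairs_eq, pvL3 (fun _ _ => PySem.Set.empty) l PySem.Dict.empty hnd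
      (by intro k hk; simp [PySem.Dict.keys_empty] at hk)]
    rfl
  have hkeys0 : (pvInitPairs l PySem.Dict.empty).keys = pvPairsKeys l := by
    rw [hkeysdef, hinit, pvPairsSpec_map_fst]
  have hnd0 : (pvInitPairs l PySem.Dict.empty).keys.Nodup := by
    rw [hkeys0]; exact pvPairsKeys_nodup l hnd
  have hget0 : ∀ k ∈ pvPairsKeys l, (pvInitPairs l PySem.Dict.empty).getD k [] = [] := by
    intro k hk
    have hmem : (k, ([] : List String)) ∈ (pvInitPairs l PySem.Dict.empty).items := by
      rw [hinit, pvPairsSpec_zero]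
      exact List.mem_map_of_mem hk
    exact PySem.Dict.getD_of_mem_items _ hmem hnd0 []
  have hfill := pvFill l
    (l.foldl (fun postings pr =>
      pr.2.foldl (fun postings x => postings.modify x [] (fun v => v ++ [pr.1])) postings)
      PySem.Dict.empty)
    (pvInitPairs l PySem.Dict.empty) hnd hvals (pvPostings_getD l hvals)
    (fun k hk => by rw [hkeys0]; exact hk) hget0
  have hkeysF : (l.foldl pvFillStep (l.foldl (fun postings pr =>
      pr.2.foldl (fun postings x => postings.modify x [] (fun v => v ++ [pr.1])) postings)
      PySem.Dict.empty, pvInitPairs l PySem.Dict.empty)).2.keys = pvPairsKeys l := by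
    rw [hfill.1, hkeys0]
  have hndF := hkeysF ▸ pvPairsKeys_nodup l hnd
  have hitemsF : (l.foldl pvFillStep (l.foldl (fun postings pr =>
        pr.2.foldl (fun postings x => postings.modify x [] (fun v => v ++ [pr.1])) postings)
        PySem.Dict.empty, pvInitPairs l PySem.Dict.empty)).2.items
      = pvPairsSpec (fun pr qt => pr.2.filter (fun x => qt.2.contains x)) l := by
    rw [PySem.Dict.items_eq_map_keys _ hndF [], hkeysF,
      ← pvPairsSpec_map_fst (fun pr qt => pr.2.filter (fun x => qt.2.contains x)) l,
      List.map_map]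
    refine (List.map_congr_left (fun kv hkv => ?_)).trans (List.map_id _)
    have hv := hfill.2.2 kv hkv
    simp [Function.comp, hv]
  simp only [commonInterests_alt]
  rw [hitemsF]

-- ===== VERDICT (by name: the statement is the Claim_ definition above) =====
theorem commonInterests_spec : Claim_equal_commonInterests := by
  intro interests _ hpre
  unfold Spec_commonInterests
  rw [pvA_eq, pvB_eq interests hpre]
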